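-- pv_equiv track=rewrite | github.com/pypi-data/pypi-mirror-378 | packages/pasvg/pasvg-1.0.6-py3-none-any.whl/pasvg/importers/markdown_importer.py | _extract_section_context
-- ===== SOURCE A (Python) =====
-- def _extract_section_context(content: str, filename: str) -> str:
--     """Extract the section context where the file is defined."""
--     lines = content.split('\n')
--     current_section = ""
--
--     for i, line in enumerate(lines):
--         # Track current section (headers)
--         if line.startswith('#'):
--             current_section = line.strip('#').strip()
--
--         # Check if this line contains our filename
--         if filename in line:
--             return current_section
--
--     return ""
-- ===== SOURCE B (Python) =====
-- def _extract_section_context(content: str, filename: str) -> str: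
--     """Locate the first line containing filename, then search backwards for the nearest header."""
--     lines = content.split('\n')
--     for i, line in enumerate(lines):
--         if filename in line:
--             for j in range(i, -1, -1):
--                 if lines[j].startswith('#'):
--                     return lines[j].strip('#').strip()
--             return ""
--     return ""
-- ===== Notes on version B (the rewrite author's own statement) =====
-- stated objective: alternative
-- what changed: Replaces A's single forward pass that carries the latest header through the whole scan with a locate-then-backward-search structure: find the first line containing filename, then scan backwards from it (inclusive) for the nearest '#' header.
import Mathlib
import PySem

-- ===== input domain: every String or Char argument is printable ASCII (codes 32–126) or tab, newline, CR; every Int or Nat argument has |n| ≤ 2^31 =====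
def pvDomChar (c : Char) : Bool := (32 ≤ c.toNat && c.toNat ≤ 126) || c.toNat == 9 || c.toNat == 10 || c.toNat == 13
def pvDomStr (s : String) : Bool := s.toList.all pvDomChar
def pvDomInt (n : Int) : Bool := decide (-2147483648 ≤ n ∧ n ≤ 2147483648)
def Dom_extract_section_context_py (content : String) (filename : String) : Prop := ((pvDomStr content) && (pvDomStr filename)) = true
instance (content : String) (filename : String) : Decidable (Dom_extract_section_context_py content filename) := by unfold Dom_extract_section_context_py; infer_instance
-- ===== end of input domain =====

-- B replaces A's single forward pass carrying the latest header with a locate-then-backward-search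
-- decomposition (find the match line, then scan back to the nearest header); objective: alternative.


-- ===== PORT A =====
-- A's loop: carry current_section forward; on the first line containing filename return it.
-- (lines are List Char via PySem.Chars, exact on the ASCII domain.)
def pvSecLoopA (filename : List Char) : List (List Char) → List Char → List Char
  | [], _ => []
  | line :: rest, cur =>
    let cur' := if PySem.Chars.startswith line ['#']
                then PySem.Chars.strip (PySem.Chars.stripChars line ['#']) else cur
    if PySem.Chars.isIn filename line then cur' else pvSecLoopA filename rest cur'

def extract_section_context_py (content : String) (filename : String) : String :=
  String.mk (pvSecLoopA filename.toList (PySem.Chars.splitOn content.toList ['\n']) [])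

-- ===== PORT B =====
-- B's backward scan from the match line (inclusive) down to index 0: the lines already
-- passed are carried most-recent-first, so the range(i, -1, -1) loop is this recursion.
def pvBackSearch : List (List Char) → List Char
  | [] => []
  | line :: rest =>
    if PySem.Chars.startswith line ['#']
    then PySem.Chars.strip (PySem.Chars.stripChars line ['#']) else pvBackSearch rest

-- B's forward locate loop: seen = lines[0..i] reversed (line i first).
def pvLocate (filename : List Char) : List (List Char) → List (List Char) → List Char
  | [], _ => []
  | line :: rest, seen =>
    if PySem.Chars.isIn filename line then pvBackSearch (line :: seen)
    else pvLocate filename rest (line :: seen)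

def extract_section_context_py_alt (content : String) (filename : String) : String :=
  String.mk (pvLocate filename.toList (PySem.Chars.splitOn content.toList ['\n']) [])

-- ===== PRECONDITION & SPEC =====
def Spec_extract_section_context_py (content : String) (filename : String) (out : String) : Prop := out = extract_section_context_py_alt content filename
instance (content : String) (filename : String) (out : String) : Decidable (Spec_extract_section_context_py content filename out) := by unfold Spec_extract_section_context_py; infer_instance

-- ===== CLAIM (what is proved, stated in full; the proofs are below) =====
def Claim_equal_extract_section_context_py : Prop := ∀ (content : String) (filename : String), Dom_extract_section_context_py content filename → Spec_extract_section_context_py content filename (extract_section_context_py content filename)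

-- ===== LEMMAS AND PROOFS =====
-- Invariant: A's carried current_section equals B's backward search over the lines seen so far.
theorem pvLoop_eq (filename : List Char) (lines : List (List Char)) :
    ∀ (seen : List (List Char)) (cur : List Char), cur = pvBackSearch seen →
      pvSecLoopA filename lines cur = pvLocate filename lines seen := by
  induction lines with
  | nil => intro seen cur h; rfl
  | cons line rest ih =>
    intro seen cur h
    simp only [pvSecLoopA, pvLocate]
    have hback : (if PySem.Chars.startswith line ['#']
        then PySem.Chars.strip (PySem.Chars.stripChars line ['#']) else cur)
        = pvBackSearch (line :: seen) := by
      simp only [pvBackSearch, h]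
    by_cases hin : PySem.Chars.isIn filename line = true
    · simp only [hin, if_true]
      exact hback
    · simp only [Bool.not_eq_true] at hin
      simp only [hin, Bool.false_eq_true, if_false]
      exact ih (line :: seen) _ hback

-- ===== VERDICT (by name: the statement is the Claim_ definition above) =====
theorem extract_section_context_py_spec : Claim_equal_extract_section_context_py := by
  intro content filename _
  unfold Spec_extract_section_context_py extract_section_context_py extract_section_context_py_alt
  exact congrArg String.mk (pvLoop_eq filename.toList _ [] [] rfl)
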